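-- pv_equiv track=rewrite | github.com/rollstar615/test-usor | varianta2.py | lista_ultimele_cifre
-- ===== SOURCE A (Python) =====
-- def numere_prime(nr):
--     # int=nr
--     #output=True or False in functie daca nr e prim sau nu
--     #verificam daca numarul are divizori in afara de el insusi sau de 1 excluzandu i pe acestia
--     #daca nr este prim return True daca se gaseste un divizor imediat este returnat false
--     k=0
--     if nr==0 or nr==1:
--         return False
--     if nr==2 or nr==3:
--         return True
--     i=2
--     while nr>i:
--         if nr%i==0:
--             k=1
--             return False
--         i=i+1
--     if k==0:
--         return True
--
-- def ultimele_3_cifre_numar(nr):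
--     #restul impartirii cu 1000 ne ofera ultimele 3 cifre ale unui nr
--     nr=nr%1000
--     return nr
--
-- def lista_ultimele_cifre(lista):
--     #verificam fiecare termen prin comparatie cu un temp care tot timpul ia valoarea lui lista[i]si verifica daca e mai mare decat rezultatul pana in acel moment
--     temp=0
--     rezultat=0
--     x=0
--     for i in range(len(lista)):
--         x=ultimele_3_cifre_numar(lista[i])
--         if numere_prime(x)==True:
--             temp=lista[i]
--         if temp>rezultat:
--             rezultat=temp
--     return rezultat
-- ===== SOURCE B (Python) =====
-- def este_prim(n):
--     if n < 2:
--         return False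
--     i = 2
--     while i * i <= n:
--         if n % i == 0:
--             return False
--         i += 1
--     return True
--
-- def lista_ultimele_cifre(lista):
--     return max((x for x in lista if x > 0 and este_prim(x % 1000)), default=0)
-- ===== Notes on version B (the rewrite author's own statement) =====
-- stated objective: idiomatic
-- what changed: Replaced the temp/rezultat state machine and the O(n)-trial-division prime test by a single max-with-default over a generator filtering positive elements whose last three digits pass a sqrt-bounded trial-division primality test.
import Mathlib
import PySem

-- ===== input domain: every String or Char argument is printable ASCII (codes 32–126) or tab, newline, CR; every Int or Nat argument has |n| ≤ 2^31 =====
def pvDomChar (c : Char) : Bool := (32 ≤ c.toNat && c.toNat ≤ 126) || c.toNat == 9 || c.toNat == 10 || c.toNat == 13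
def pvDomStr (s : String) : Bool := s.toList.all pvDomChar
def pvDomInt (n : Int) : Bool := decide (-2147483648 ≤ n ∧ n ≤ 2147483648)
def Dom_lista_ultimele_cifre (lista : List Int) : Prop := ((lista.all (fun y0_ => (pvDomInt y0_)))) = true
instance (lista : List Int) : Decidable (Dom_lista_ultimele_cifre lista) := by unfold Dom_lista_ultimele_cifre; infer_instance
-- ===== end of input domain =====

-- B replaces A's temp/rezultat state machine and full-range trial division by a
-- max-with-default over positive elements whose last three digits pass a sqrt-bounded
-- trial-division primality test (idiomatic; same return value).

-- ===== PORT A =====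
-- A's while loop 'i=2; while nr>i: …; i=i+1' (fuel (nr-2).toNat is exactly the
-- remaining iteration count; the guard is still checked every step)
def numerePrimeLoop : Nat → Int → Int → Bool
  | 0, _, _ => true
  | fuel+1, nr, i =>
    if nr > i then
      if PySem.Int.mod nr i == 0 then false
      else numerePrimeLoop fuel nr (i+1)
    else true

def numerePrime (nr : Int) : Bool :=
  if nr == 0 || nr == 1 then false
  else if nr == 2 || nr == 3 then true
  else numerePrimeLoop (nr - 2).toNat nr 2

def ultimele3CifreNumar (nr : Int) : Int := PySem.Int.mod nr 1000

-- the body of A's for-loop: st = (temp, rezultat)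
def pasA (st : Int × Int) (li : Int) : Int × Int :=
  let x := ultimele3CifreNumar li
  let temp := if numerePrime x then li else st.1
  let rez := if temp > st.2 then temp else st.2
  (temp, rez)

def lista_ultimele_cifre (lista : List Int) : Int :=
  (lista.foldl pasA (0, 0)).2

-- ===== PORT B =====
-- B's while loop 'i=2; while i*i<=n: …; i+=1' (fuel n.toNat bounds the iteration
-- count, since i*i ≤ n forces i ≤ n; the guard is still checked every step)
def estePrimLoop : Nat → Int → Int → Bool
  | 0, _, _ => true
  | fuel+1, n, i =>
    if i * i ≤ n then
      if PySem.Int.mod n i == 0 then false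
      else estePrimLoop fuel n (i+1)
    else true

def estePrim (n : Int) : Bool :=
  if n < 2 then false else estePrimLoop n.toNat n 2

def lista_ultimele_cifre_alt (lista : List Int) : Int :=
  (lista.filter (fun x => decide (x > 0) && estePrim (PySem.Int.mod x 1000))).foldl max 0

-- ===== PRECONDITION & SPEC =====
def Spec_lista_ultimele_cifre (lista : List Int) (out : Int) : Prop := out = lista_ultimele_cifre_alt lista
instance (lista : List Int) (out : Int) : Decidable (Spec_lista_ultimele_cifre lista out) := by unfold Spec_lista_ultimele_cifre; infer_instance

-- ===== CLAIM (what is proved, stated in full; the proofs are below) =====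
def Claim_equal_lista_ultimele_cifre : Prop := ∀ (lista : List Int), Dom_lista_ultimele_cifre lista → Spec_lista_ultimele_cifre lista (lista_ultimele_cifre lista)

-- ===== LEMMAS AND PROOFS =====

-- A's and B's prime tests agree on 0..999, the range of (· % 1000)
set_option maxRecDepth 100000 in
set_option maxHeartbeats 4000000 in
theorem prime_agree_fin : ∀ m : Fin 1000, numerePrime (m : Int) = estePrim (m : Int) := by
  decide

theorem prime_agree (x : Int) (h0 : 0 ≤ x) (h1 : x < 1000) :
    numerePrime x = estePrim x := by
  have hx : x = ((⟨x.toNat, by omega⟩ : Fin 1000) : Int) := by simp; omega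
  rw [hx]; exact prime_agree_fin _

theorem pasA_eq (st : Int × Int) (li : Int) :
    pasA st li =
      ((if numerePrime (PySem.Int.mod li 1000) then li else st.1),
       (if (if numerePrime (PySem.Int.mod li 1000) then li else st.1) > st.2
        then (if numerePrime (PySem.Int.mod li 1000) then li else st.1) else st.2)) := rfl

-- the fold invariant: temp never exceeds rezultat, rezultat stays nonnegative, and
-- rezultat evolves exactly as B's max-fold over the filtered list
theorem fold_invariant :
    ∀ (l : List Int) (temp rez : Int), temp ≤ rez → 0 ≤ rez →
    (l.foldl pasA (temp, rez)).2
      = (l.filter (fun x => decide (x > 0) && estePrim (PySem.Int.mod x 1000))).foldl max rez := by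
  intro l
  induction l with
  | nil => intro temp rez _ _; simp
  | cons li rest ih =>
    intro temp rez htr hr
    have hm0 : 0 ≤ PySem.Int.mod li 1000 := PySem.Int.mod_nonneg li (by norm_num)
    have hm1 : PySem.Int.mod li 1000 < 1000 := PySem.Int.mod_lt li (by norm_num)
    have hpa := prime_agree (PySem.Int.mod li 1000) hm0 hm1
    rw [List.foldl_cons, List.filter_cons, pasA_eq]
    by_cases hp : numerePrime (PySem.Int.mod li 1000) = true
    · simp only [hp, if_true]
      by_cases hpos : li > 0
      · have hc : (decide (li > 0) && estePrim (PySem.Int.mod li 1000)) = true := by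
          rw [← hpa, hp, decide_eq_true hpos]; rfl
        rw [if_pos hc, List.foldl_cons]
        have hmax : (if li > rez then li else rez) = max rez li := by
          rw [max_def]; split_ifs <;> omega
        rw [hmax]
        exact ih li (max rez li) (le_max_right rez li) (le_trans hr (le_max_left rez li))
      · have hc : ¬ ((decide (li > 0) && estePrim (PySem.Int.mod li 1000)) = true) := by
          simp [hpos]
        rw [if_neg hc]
        have hgt : ¬ li > rez := by omega
        rw [if_neg hgt]
        exact ih li rez (le_of_not_gt hgt) hr
    · simp only [hp, if_false, Bool.false_eq_true]
      have hc : ¬ ((decide (li > 0) && estePrim (PySem.Int.mod li 1000)) = true) := by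
        rw [← hpa]
        intro h
        simp only [Bool.and_eq_true] at h
        exact hp h.2
      rw [if_neg hc]
      have hgt : ¬ temp > rez := by omega
      rw [if_neg hgt]
      exact ih temp rez htr hr

-- ===== VERDICT (by name: the statement is the Claim_ definition above) =====
theorem lista_ultimele_cifre_spec : Claim_equal_lista_ultimele_cifre := by
  intro lista _
  unfold Spec_lista_ultimele_cifre lista_ultimele_cifre lista_ultimele_cifre_alt
  exact fold_invariant lista 0 0 le_rfl le_rfl
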